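-- pv_equiv track=rewrite | github.com/Fratoni-Mateus/PythonStudies | substrings.py | locate_first
-- ===== SOURCE A (Python) =====
-- def locate_first(string, target):
--     total = 0
--     index = 0
--     pos = 0
--     while index < len(string):
--         if string[index : index + len(target)] == target:
--             total += 1
--             pos = index
--             index += len(target)
--         else:
--             index += 1
--     if total == 0:
--         pos = -1
--     return pos
-- ===== SOURCE B (Python) =====
-- def locate_first(string, target):
--     # Same greedy non-overlapping scan, delegated to str.find: jump from one
--     # leftmost occurrence to the next, keeping the last match's start index.
--     pos = -1
--     i = string.find(target)
--     while i != -1: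
--         pos = i
--         i = string.find(target, i + len(target))
--     return pos
-- ===== Notes on version B (the rewrite author's own statement) =====
-- stated objective: faster
-- what changed: Replaces the per-index slice-and-compare while loop (with a match counter) by a loop of str.find calls that jumps directly from one leftmost occurrence to the next, keeping the last match start.
-- outside the precondition, e.g. on locate_first('', ''): A returns -1, B does not finish within the time limit
import Mathlib
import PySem

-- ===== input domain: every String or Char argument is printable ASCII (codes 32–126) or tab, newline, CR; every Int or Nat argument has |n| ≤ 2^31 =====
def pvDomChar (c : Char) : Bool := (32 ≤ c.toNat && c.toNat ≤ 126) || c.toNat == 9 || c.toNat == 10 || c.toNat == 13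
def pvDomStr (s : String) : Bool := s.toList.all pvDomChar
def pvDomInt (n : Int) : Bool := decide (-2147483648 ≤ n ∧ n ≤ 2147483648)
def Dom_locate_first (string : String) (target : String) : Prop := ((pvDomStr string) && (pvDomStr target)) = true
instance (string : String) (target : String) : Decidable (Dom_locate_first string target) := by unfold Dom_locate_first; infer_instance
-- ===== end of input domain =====

-- B replaces A's per-index slice-and-compare scan by a loop of find calls that
-- jumps from one leftmost occurrence to the next, keeping the last match start.

-- ===== PORT A =====
-- A's while loop; fuel (length+1) bounds the iterations: for a nonempty target
-- the index strictly increases each iteration, so fuel never runs out on Pre_.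
def pvALoop (s t : List Char) : Nat → Nat → Nat → Nat → Int
  | 0, _, total, pos => if total = 0 then -1 else (pos : Int)
  | fuel + 1, index, total, pos =>
    if index < s.length then
      if PySem.List.slice s (some (index : Int)) (some ((index : Int) + (t.length : Int))) = t then
        pvALoop s t fuel (index + t.length) (total + 1) index
      else
        pvALoop s t fuel (index + 1) total pos
    else if total = 0 then -1 else (pos : Int)

def locate_first (string : String) (target : String) : Int :=
  pvALoop string.toList target.toList (string.toList.length + 1) 0 0 0

-- ===== PORT B =====
-- B's while loop; same fuel bound (find-result + len(target) strictly increases).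
def pvBLoop (s t : List Char) : Nat → Int → Int → Int
  | 0, _, pos => pos
  | fuel + 1, i, pos =>
    if i ≠ -1 then pvBLoop s t fuel (PySem.Chars.findFrom s t (i + (t.length : Int)) none) i
    else pos

def locate_first_alt (string : String) (target : String) : Int :=
  pvBLoop string.toList target.toList (string.toList.length + 1)
    (PySem.Chars.find string.toList target.toList) (-1)

-- ===== PRECONDITION & SPEC =====
-- Pre_ excludes only the empty target, on which A loops forever for every
-- nonempty string (and B does too); on ("", "") alone A returns -1 while B diverges.
def Pre_locate_first (string : String) (target : String) : Prop := target ≠ ""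
instance (string : String) (target : String) : Decidable (Pre_locate_first string target) := by
  unfold Pre_locate_first; infer_instance

def pvWitness_locate_first : String × String := ("abcabcab", "abc")

def Spec_locate_first (string : String) (target : String) (out : Int) : Prop :=
  out = locate_first_alt string target
instance (string : String) (target : String) (out : Int) : Decidable (Spec_locate_first string target out) := by
  unfold Spec_locate_first; infer_instance

-- ===== CLAIM (what is proved, stated in full; the proofs are below) =====
def Claim_equal_locate_first : Prop := ∀ (string : String) (target : String), Dom_locate_first string target → Pre_locate_first string target → Spec_locate_first string target (locate_first string target)

-- ===== LEMMAS AND PROOFS =====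

-- first occurrence of t at a position ≥ i (proof-only reference function)
def pvFirstOcc (s t : List Char) (i : Nat) : Option Nat :=
  if _h : i ≤ s.length then
    if (s.drop i).take t.length = t then some i else pvFirstOcc s t (i + 1)
  else none
termination_by s.length + 1 - i

-- A's slice test is the prefix test on the dropped suffix
theorem pv_slice_match_iff (s t : List Char) (i : Nat) :
    (PySem.List.slice s (some (i : Int)) (some ((i : Int) + (t.length : Int))) = t)
      ↔ t <+: s.drop i := by
  rw [PySem.List.slice_natCast_add]
  constructor
  · intro h; rw [← h]; exact List.take_prefix _ _
  · intro h; exact (List.prefix_iff_eq_take.mp h).symm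

theorem pv_firstOcc_none (s t : List Char) (ht : t ≠ []) :
    ∀ i, pvFirstOcc s t i = none → ∀ j, i ≤ j → ¬ t <+: s.drop j := by
  intro i
  induction i using pvFirstOcc.induct s t with
  | case1 i hi hm =>
      intro h; rw [pvFirstOcc, dif_pos hi, if_pos hm] at h; exact absurd h (by simp)
  | case2 i hi hm ih =>
      intro h j hij hpre
      rw [pvFirstOcc, dif_pos hi, if_neg hm] at h
      rcases Nat.eq_or_lt_of_le hij with rfl | hlt
      · exact hm (List.prefix_iff_eq_take.mp hpre).symm
      · exact ih h j hlt hpre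
  | case3 i hi =>
      intro _ j hij hpre
      have hj : s.length ≤ j := by omega
      have : s.drop j = [] := List.drop_eq_nil_of_le hj
      rw [this] at hpre
      exact ht (List.prefix_nil.mp hpre)

theorem pv_firstOcc_some (s t : List Char) :
    ∀ i j, pvFirstOcc s t i = some j →
      i ≤ j ∧ t <+: s.drop j ∧ ∀ k, i ≤ k → k < j → ¬ t <+: s.drop k := by
  intro i
  induction i using pvFirstOcc.induct s t with
  | case1 i hi hm =>
      intro j h
      rw [pvFirstOcc, dif_pos hi, if_pos hm] at h
      obtain rfl : i = j := by simpa using h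
      exact ⟨le_refl _, by rw [← hm]; exact List.take_prefix _ _, fun k h1 h2 => absurd h1 (by omega)⟩
  | case2 i hi hm ih =>
      intro j h
      rw [pvFirstOcc, dif_pos hi, if_neg hm] at h
      obtain ⟨h1, h2, h3⟩ := ih j h
      refine ⟨by omega, h2, fun k hk1 hk2 hpre => ?_⟩
      rcases Nat.eq_or_lt_of_le hk1 with rfl | hlt
      · exact hm (List.prefix_iff_eq_take.mp hpre).symm
      · exact h3 k hlt hk2 hpre
  | case3 i hi =>
      intro j h; rw [pvFirstOcc, dif_neg hi] at h; exact absurd h (by simp)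

-- findFrom computes pvFirstOcc (for a nonempty target and an in-range start)
theorem pv_findFrom_eq (s t : List Char) (ht : t ≠ []) (i : Nat) (hi : i ≤ s.length) :
    PySem.Chars.findFrom s t (i : Int) none =
      (match pvFirstOcc s t i with | none => -1 | some j => (j : Int)) := by
  cases hocc : pvFirstOcc s t i with
  | none =>
      have hno : ∀ j, i ≤ j → ¬ t <+: s.drop j := pv_firstOcc_none s t ht i hocc
      have : ¬ t <:+: s.drop i := by
        intro hinf
        have : ∃ j, t <+: (s.drop i).drop j := by
          rw [PySem.Chars.exists_prefix_drop_iff_isIn, PySem.Chars.isIn_iff_infix]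
          exact hinf
        obtain ⟨j, hj⟩ := this
        rw [List.drop_drop] at hj
        exact hno (i + j) (by omega) hj
      simpa using (PySem.Chars.findFrom_natCast_eq_neg_one_iff s t i hi).mpr this
  | some j =>
      obtain ⟨hij, hpre, hmin⟩ := pv_firstOcc_some s t i j hocc
      have hne : PySem.Chars.findFrom s t (i : Int) none ≠ -1 := by
        intro heq
        have hno := (PySem.Chars.findFrom_natCast_eq_neg_one_iff s t i hi).mp heq
        apply hno
        rw [← PySem.Chars.isIn_iff_infix, ← PySem.Chars.exists_prefix_drop_iff_isIn]
        refine ⟨j - i, ?_⟩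
        have he : List.drop (j - i) (List.drop i s) = List.drop j s := by
          rw [List.drop_drop]; congr 1; omega
        rw [he]; exact hpre
      obtain ⟨hle, hfpre, hfmin⟩ := PySem.Chars.findFrom_natCast_spec s t i hi hne
      set f := PySem.Chars.findFrom s t (i : Int) none with hf
      have hf0 : 0 ≤ f := le_trans (by exact_mod_cast Int.natCast_nonneg i) hle
      have hcast : (f.toNat : Int) = f := Int.toNat_of_nonneg hf0
      have hile : i ≤ f.toNat := by rw [← hcast] at hle; exact_mod_cast hle
      have hjf : j = f.toNat := by
        rcases lt_trichotomy j f.toNat with h | h | h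
        · exact absurd hpre (hfmin j hij h)
        · exact h
        · exact absurd hfpre (hmin f.toNat hile h)
      show f = (j : Int)
      rw [hjf]; exact hcast.symm

theorem pv_bLoop_neg_one (s t : List Char) (fb : Nat) (p : Int) :
    pvBLoop s t fb (-1) p = p := by
  cases fb <;> simp [pvBLoop]

-- the cross lemma: A's scan from index i equals B's find loop started at i
theorem pv_cross (s t : List Char) (ht : t ≠ []) :
    ∀ fa i total pos fb, i ≤ s.length → s.length < i + fa → s.length < i + fb →
      pvALoop s t fa i total pos =
        pvBLoop s t fb (PySem.Chars.findFrom s t (i : Int) none)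
          (if total = 0 then -1 else (pos : Int)) := by
  intro fa
  induction fa with
  | zero => intro i total pos fb hi hfa hfb; omega
  | succ fa ih =>
      intro i total pos fb hi hfa hfb
      by_cases hlt : i < s.length
      · by_cases hm : PySem.List.slice s (some (i : Int)) (some ((i : Int) + (t.length : Int))) = t
        · -- match at i: both sides advance to i + |t|
          have hpre : t <+: s.drop i := (pv_slice_match_iff s t i).mp hm
          have htl : 0 < t.length := List.length_pos_of_ne_nil ht
          have him : i + t.length ≤ s.length := by
            have := hpre.length_le
            simp [List.length_drop] at this
            omega
          have hfi : PySem.Chars.findFrom s t (i : Int) none = (i : Int) := by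
            rw [pv_findFrom_eq s t ht i hi]
            have : pvFirstOcc s t i = some i := by
              rw [pvFirstOcc, dif_pos hi, if_pos (List.prefix_iff_eq_take.mp hpre).symm]
            rw [this]
          obtain ⟨fb', rfl⟩ : ∃ fb', fb = fb' + 1 := ⟨fb - 1, by omega⟩
          rw [pvALoop, if_pos hlt, if_pos hm, hfi, pvBLoop]
          simp only [ne_eq, ite_not]
          have hne : ¬ ((i : Int) = -1) := by omega
          rw [if_neg hne]
          have hcast : (i : Int) + (t.length : Int) = ((i + t.length : Nat) : Int) := by push_cast; ring
          rw [hcast, ih (i + t.length) (total + 1) i fb' him (by omega) (by omega)]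
          simp
        · -- no match at i: A advances by 1, B's find result is unchanged
          have hstep : pvFirstOcc s t i = pvFirstOcc s t (i + 1) := by
            have hm' : ¬ ((s.drop i).take t.length = t) := fun h =>
              hm ((pv_slice_match_iff s t i).mpr (by rw [← h]; exact List.take_prefix _ _))
            rw [pvFirstOcc, dif_pos hi, if_neg hm']
          rw [pvALoop, if_pos hlt, if_neg hm,
            ih (i + 1) total pos fb (by omega) (by omega) (by omega),
            pv_findFrom_eq s t ht i hi, pv_findFrom_eq s t ht (i + 1) (by omega), hstep]
      · -- i = length: loop exits, find from here fails
        have hieq : i = s.length := by omega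
        have hfi : PySem.Chars.findFrom s t (i : Int) none = -1 := by
          rw [pv_findFrom_eq s t ht i hi, pvFirstOcc, dif_pos hi]
          have : (s.drop i).take t.length = [] := by
            rw [List.drop_eq_nil_of_le (by omega), List.take_nil]
          rw [if_neg (by rw [this]; exact fun h => ht h.symm), pvFirstOcc, dif_neg (by omega)]
        rw [pvALoop, if_neg hlt, hfi, pv_bLoop_neg_one]

-- ===== VERDICT (by name: the statement is the Claim_ definition above) =====
theorem locate_first_spec : Claim_equal_locate_first := by
  intro string target _hdom hpre
  unfold Spec_locate_first locate_first locate_first_alt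
  have ht : target.toList ≠ [] := by
    intro h
    exact hpre (by simpa using congrArg String.ofList h)
  have := pv_cross string.toList target.toList ht (string.toList.length + 1) 0 0 0
    (string.toList.length + 1) (by omega) (by omega) (by omega)
  rw [this]
  norm_num [PySem.Chars.findFrom_zero]
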